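-- pv_equiv track=rewrite | github.com/pietroagazzi/orche | orche/cli.py | _parse_chained
-- ===== SOURCE A (Python) =====
-- def _parse_chained(
--     command: str, services: tuple[str, ...]
-- ) -> list[tuple[str, list[str]]]:
--     """Split a flat token list into chained (command, services) pairs.
--
--     Commas act as separators between invocations, either standalone (`` , ``)
--     or attached to the preceding token (``build,``).
--
--     Empty groups produced by leading, trailing, or consecutive commas are
--     silently filtered out. As a result, degenerate inputs such as ``orche ,``
--     or ``orche ,,`` produce an empty list and no commands are executed. The
--     caller is responsible for warning the user when the returned list is empty.
--
--     Examples::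
--
--         _parse_chained("build,", ("up", "web"))
--         # → [("build", []), ("up", ["web"])]
--
--         _parse_chained("up", ("web,", "build"))
--         # → [("up", ["web"]), ("build", [])]
--
--         _parse_chained(",", ("up",))
--         # → [("up", [])]  leading comma is dropped, "up" still runs
--
--         _parse_chained(",", (",",))
--         # → []  all tokens are commas, nothing to run
--     """
--     tokens = [command, *services]
--     groups: list[list[str]] = []
--     current: list[str] = []
--
--     for token in tokens:
--         if token == ",":
--             groups.append(current)
--             current = []
--         elif token.endswith(","):
--             current.append(token[:-1])
--             groups.append(current)
--             current = []
--         else: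
--             current.append(token)
--
--     if current:
--         groups.append(current)
--
--     return [(g[0], g[1:]) for g in groups if g]
-- ===== SOURCE B (Python) =====
-- def _parse_chained(command, services):
--     """Two-pass re-implementation: first normalize attached/standalone commas
--     into an explicit None separator stream, then split that stream on the
--     separators, emitting (head, tail) pairs for the non-empty runs."""
--     # pass 1: normalized token stream (None = separator)
--     stream = []
--     for tok in (command, *services):
--         if tok == ",":
--             stream.append(None)
--         elif tok.endswith(","):
--             stream.extend((tok[:-1], None))
--         else:
--             stream.append(tok)
--     # pass 2: split on separators; a final sentinel flushes the last run
--     result = []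
--     group = []
--     for item in (*stream, None):
--         if item is None:
--             if group:
--                 result.append((group[0], group[1:]))
--             group = []
--         else:
--             group.append(item)
--     return result
-- ===== Notes on version B (the rewrite author's own statement) =====
-- stated objective: alternative
-- what changed: Replaces A's single stateful groups/current loop plus trailing flush and final filter-comprehension by a two-pass pipeline: normalize tokens into an explicit separator (None) stream, then split that stream on separators with a sentinel, emitting (head, tail) pairs immediately.
import Mathlib
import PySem

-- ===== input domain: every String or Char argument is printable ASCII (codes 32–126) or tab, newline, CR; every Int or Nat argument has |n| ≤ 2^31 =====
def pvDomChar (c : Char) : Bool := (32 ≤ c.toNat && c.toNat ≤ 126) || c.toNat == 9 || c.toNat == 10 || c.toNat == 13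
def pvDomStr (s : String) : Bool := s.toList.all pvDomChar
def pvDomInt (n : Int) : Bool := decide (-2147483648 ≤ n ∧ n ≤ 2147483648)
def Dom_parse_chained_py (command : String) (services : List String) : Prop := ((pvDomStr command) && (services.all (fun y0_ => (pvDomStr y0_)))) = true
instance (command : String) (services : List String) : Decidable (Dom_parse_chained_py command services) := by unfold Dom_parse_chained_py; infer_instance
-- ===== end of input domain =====

-- ===== PORT A =====
-- B is a two-pass pipeline (normalize commas to explicit separators, then split) instead of
-- A's single stateful groups/current loop; same cost, different decomposition.

-- port of A's loop body: state = (groups, current)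
def pvStepA (st : List (List String) × List String) (token : String) :
    List (List String) × List String :=
  if token = "," then (st.1 ++ [st.2], [])
  else if PySem.Str.endswith token "," then
    (st.1 ++ [st.2 ++ [PySem.Str.slice token none (some (-1))]], [])
  else (st.1, st.2 ++ [token])

-- port of A's final comprehension [(g[0], g[1:]) for g in groups if g]
-- (g[0] / g[1:] via headD/drop are exact: the filter keeps only non-empty g)
def pvEmit (groups : List (List String)) : List (String × List String) :=
  (groups.filter (fun g => !g.isEmpty)).map (fun g => (g.headD "", g.drop 1))

def parse_chained_py (command : String) (services : List String) :
    List (String × List String) :=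
  let tokens := command :: services
  let st := tokens.foldl pvStepA ([], [])
  let groups := if st.2.isEmpty then st.1 else st.1 ++ [st.2]
  pvEmit groups

-- ===== PORT B =====
-- pass 1 body: one token's contribution to the normalized stream (none = separator)
def pvEnc (tok : String) : List (Option String) :=
  if tok = "," then [none]
  else if PySem.Str.endswith tok "," then
    [some (PySem.Str.slice tok none (some (-1))), none]
  else [some tok]

-- pass 2 body: state = (result, group)
def pvStepB (st : List (String × List String) × List String) (item : Option String) :
    List (String × List String) × List String :=
  match item with
  | none => ((match st.2 with | [] => st.1 | h :: t => st.1 ++ [(h, t)]), [])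
  | some s => (st.1, st.2 ++ [s])

def parse_chained_py_alt (command : String) (services : List String) :
    List (String × List String) :=
  let stream := (command :: services).foldl (fun acc tok => acc ++ pvEnc tok) []
  ((stream ++ [none]).foldl pvStepB ([], [])).1

-- ===== PRECONDITION & SPEC =====
def Spec_parse_chained_py (command : String) (services : List String) (out : List (String × List String)) : Prop := out = parse_chained_py_alt command services
instance (command : String) (services : List String) (out : List (String × List String)) : Decidable (Spec_parse_chained_py command services out) := by unfold Spec_parse_chained_py; infer_instance

-- ===== CLAIM (what is proved, stated in full; the proofs are below) =====
def Claim_equal_parse_chained_py : Prop := ∀ (command : String) (services : List String), Dom_parse_chained_py command services → Spec_parse_chained_py command services (parse_chained_py command services)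

-- ===== LEMMAS AND PROOFS =====

-- shared recursive specification: result of processing remaining tokens with pending group cur
def pvEmitOne (cur : List String) : List (String × List String) :=
  match cur with | [] => [] | h :: t => [(h, t)]

def pvSpec : List String → List String → List (String × List String)
  | [], cur => pvEmitOne cur
  | t :: ts, cur =>
    if t = "," then pvEmitOne cur ++ pvSpec ts []
    else if PySem.Str.endswith t "," then
      pvEmitOne (cur ++ [PySem.Str.slice t none (some (-1))]) ++ pvSpec ts []
    else pvSpec ts (cur ++ [t])

theorem pvEmit_append (gs hs : List (List String)) :
    pvEmit (gs ++ hs) = pvEmit gs ++ pvEmit hs := by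
  simp [pvEmit]

theorem pvEmit_singleton (g : List String) : pvEmit [g] = pvEmitOne g := by
  cases g <;> simp [pvEmit, pvEmitOne]

theorem a_eq_spec (ts : List String) : ∀ gs cur,
    pvEmit (let st := ts.foldl pvStepA (gs, cur);
            if st.2.isEmpty then st.1 else st.1 ++ [st.2])
      = pvEmit gs ++ pvSpec ts cur := by
  induction ts with
  | nil =>
    intro gs cur
    cases cur <;> simp [pvSpec, pvEmitOne, pvEmit_append, pvEmit_singleton]
  | cons t ts ih =>
    intro gs cur
    by_cases h1 : t = ","
    · have hstep : pvStepA (gs, cur) t = (gs ++ [cur], []) := by simp [pvStepA, h1]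
      rw [List.foldl_cons, hstep, ih, pvEmit_append, pvEmit_singleton]
      simp [pvSpec, h1]
    · by_cases h2 : PySem.Chars.endswith t.toList [','] = true
      · have hstep : pvStepA (gs, cur) t
            = (gs ++ [cur ++ [PySem.Str.slice t none (some (-1))]], []) := by
          simp [pvStepA, h1, h2]
        rw [List.foldl_cons, hstep, ih, pvEmit_append, pvEmit_singleton]
        simp [pvSpec, h1, h2]
      · have hstep : pvStepA (gs, cur) t = (gs, cur ++ [t]) := by simp [pvStepA, h1, h2]
        rw [List.foldl_cons, hstep, ih]
        simp [pvSpec, h1, h2]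

theorem b_eq_spec (ts : List String) : ∀ res cur,
    ((ts.flatMap pvEnc ++ [none]).foldl pvStepB (res, cur)).1 = res ++ pvSpec ts cur := by
  induction ts with
  | nil =>
    intro res cur
    cases cur <;> simp [pvStepB, pvSpec, pvEmitOne]
  | cons t ts ih =>
    intro res cur
    by_cases h1 : t = ","
    · subst h1
      have hs : (("," :: ts).flatMap pvEnc ++ [none]) = none :: (ts.flatMap pvEnc ++ [none]) := by
        simp [pvEnc]
      have hstep : pvStepB (res, cur) none = (res ++ pvEmitOne cur, []) := by
        cases cur <;> simp [pvStepB, pvEmitOne]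
      rw [hs, List.foldl_cons, hstep, ih]
      simp [pvSpec]
    · by_cases h2 : PySem.Chars.endswith t.toList [','] = true
      · have hs : ((t :: ts).flatMap pvEnc ++ [none])
            = some (PySem.Str.slice t none (some (-1))) :: none :: (ts.flatMap pvEnc ++ [none]) := by
          simp [pvEnc, h1, h2]
        have hstep : pvStepB (pvStepB (res, cur) (some (PySem.Str.slice t none (some (-1))))) none
            = (res ++ pvEmitOne (cur ++ [PySem.Str.slice t none (some (-1))]), []) := by
          cases cur <;> simp [pvStepB, pvEmitOne]
        rw [hs, List.foldl_cons, List.foldl_cons, hstep, ih]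
        simp [pvSpec, h1, h2]
      · have hs : ((t :: ts).flatMap pvEnc ++ [none]) = some t :: (ts.flatMap pvEnc ++ [none]) := by
          simp [pvEnc, h1, h2]
        have hstep : pvStepB (res, cur) (some t) = (res, cur ++ [t]) := by simp [pvStepB]
        rw [hs, List.foldl_cons, hstep, ih]
        simp [pvSpec, h1, h2]

-- ===== VERDICT (by name: the statement is the Claim_ definition above) =====
theorem parse_chained_py_spec : Claim_equal_parse_chained_py := by
  intro command services _
  show parse_chained_py command services = parse_chained_py_alt command services
  unfold parse_chained_py parse_chained_py_alt
  rw [PySem.List.foldl_append_eq_flatMap, List.nil_append, b_eq_spec]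
  simpa [pvEmit] using a_eq_spec (command :: services) [] []
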